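-- pv_equiv track=rewrite | github.com/ctak/python-notebook | lib/tdash/test_basic.py | name_to_keywords
-- ===== SOURCE A (Python) =====
-- def name_to_keywords(nm, separator='_'):
--   if nm is None:
--     raise Exception('name is None')
--   # strip name
--   nm = nm.strip()
--   if nm == '':
--     raise Exception('name is Empty String')
--   # returned list
--   rtn = []
--   tokens = nm.split(separator)
--   for i in range(len(tokens)):
--     rtn.append( separator.join(tokens[0+i:len(tokens)]) )
--   return rtn
-- ===== SOURCE B (Python) =====
-- def name_to_keywords(nm, separator='_'):
--   if nm is None:
--     raise Exception('name is None')
--   nm = nm.strip()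
--   if nm == '':
--     raise Exception('name is Empty String')
--   tokens = nm.split(separator)
--   # single right-to-left pass maintaining the running suffix join
--   acc = None
--   out = []
--   for t in reversed(tokens):
--     acc = t if acc is None else t + separator + acc
--     out.append(acc)
--   out.reverse()
--   return out
-- ===== Notes on version B (the rewrite author's own statement) =====
-- stated objective: alternative
-- what changed: Instead of re-joining the slice tokens[i:] for every i, B scans the tokens once right-to-left maintaining a running suffix string, collecting each suffix and reversing the collected list.
import Mathlib
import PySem

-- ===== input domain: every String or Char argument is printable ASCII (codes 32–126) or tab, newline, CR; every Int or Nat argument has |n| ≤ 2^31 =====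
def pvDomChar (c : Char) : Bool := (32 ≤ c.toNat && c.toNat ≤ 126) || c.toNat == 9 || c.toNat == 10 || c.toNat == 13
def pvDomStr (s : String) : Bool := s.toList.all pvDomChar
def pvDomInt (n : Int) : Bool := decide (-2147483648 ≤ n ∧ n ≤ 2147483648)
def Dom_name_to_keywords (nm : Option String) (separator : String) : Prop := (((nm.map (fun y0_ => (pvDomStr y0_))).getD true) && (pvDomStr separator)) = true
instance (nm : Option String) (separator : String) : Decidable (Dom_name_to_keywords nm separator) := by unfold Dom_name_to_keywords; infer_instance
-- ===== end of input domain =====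

-- B replaces A's per-index slice-and-join with one right-to-left pass maintaining a running suffix string (alternative decomposition; equal on all inputs where A returns).


-- ===== PORT A =====
-- raise-branches return [] but are excluded by Pre_name_to_keywords
def name_to_keywords (nm : Option String) (separator : String) : List String :=
  match nm with
  | none => []
  | some s =>
    let nm' := PySem.Str.strip s
    if nm' = "" then []
    else
      match PySem.Str.split? nm' separator with
      | none => []  -- separator = '': Python raises ValueError
      | some tokens =>
        List.foldl
          (fun rtn i =>
            rtn ++ [PySem.Str.join separator
              (PySem.List.slice tokens (some (0 + i)) (some (tokens.length : Int)))])
          [] (PySem.List.pyRange 0 (tokens.length : Int) 1)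

-- ===== PORT B =====
def name_to_keywords_alt (nm : Option String) (separator : String) : List String :=
  match nm with
  | none => []
  | some s =>
    let nm' := PySem.Str.strip s
    if nm' = "" then []
    else
      match PySem.Str.split? nm' separator with
      | none => []
      | some tokens =>
        ((tokens.reverse).foldl
          (fun (st : Option String × List String) (t : String) =>
            let acc := match st.1 with | none => t | some a => t ++ separator ++ a
            (some acc, st.2 ++ [acc]))
          (none, [])).2.reverse

-- ===== PRECONDITION & SPEC =====
-- Pre_ excludes exactly the inputs where Python A raises: nm None, nm stripping to '', and separator '' (ValueError from split)
def Pre_name_to_keywords (nm : Option String) (separator : String) : Prop :=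
  nm.isSome = true ∧ PySem.Str.strip (nm.getD "") ≠ "" ∧ separator ≠ ""
instance (nm : Option String) (separator : String) : Decidable (Pre_name_to_keywords nm separator) := by unfold Pre_name_to_keywords; infer_instance
def pvWitness_name_to_keywords : Option String × String := (some " a_b ", "_")

def Spec_name_to_keywords (nm : Option String) (separator : String) (out : List String) : Prop := out = name_to_keywords_alt nm separator
instance (nm : Option String) (separator : String) (out : List String) : Decidable (Spec_name_to_keywords nm separator out) := by unfold Spec_name_to_keywords; infer_instance

-- ===== CLAIM (what is proved, stated in full; the proofs are below) =====
def Claim_equal_name_to_keywords : Prop := ∀ (nm : Option String) (separator : String), Dom_name_to_keywords nm separator → Pre_name_to_keywords nm separator → Spec_name_to_keywords nm separator (name_to_keywords nm separator)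

-- ===== LEMMAS AND PROOFS =====

-- the list of suffix joins, longest first: the common characterisation of both loops
def sfxJoins (sep : String) : List String → List String
  | [] => []
  | t :: rest => PySem.Str.join sep (t :: rest) :: sfxJoins sep rest

lemma str_join_singleton (sep p : String) : PySem.Str.join sep [p] = p := by
  apply String.ext
  simp [PySem.Str.toList_join, PySem.Chars.join_singleton]

lemma str_join_cons_cons (sep p q : String) (rest : List String) :
    PySem.Str.join sep (p :: q :: rest) = p ++ sep ++ PySem.Str.join sep (q :: rest) := by
  apply String.ext
  simp [PySem.Str.toList_join, PySem.Chars.join_cons_cons]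

lemma sfxJoins_eq_map (sep : String) (ts : List String) :
    sfxJoins sep ts = (List.range ts.length).map (fun k => PySem.Str.join sep (ts.drop k)) := by
  induction ts with
  | nil => simp [sfxJoins]
  | cons t rest ih =>
      simp [sfxJoins, List.range_succ_eq_map, ih, List.map_map, Function.comp]

lemma aLoop_eq (sep : String) (ts : List String) :
    List.foldl
      (fun rtn i =>
        rtn ++ [PySem.Str.join sep
          (PySem.List.slice ts (some (0 + i)) (some (ts.length : Int)))])
      [] (PySem.List.pyRange 0 (ts.length : Int) 1)
    = sfxJoins sep ts := by
  rw [PySem.List.pyRange_zero_natCast, sfxJoins_eq_map]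
  rw [PySem.List.foldl_append_singleton_eq_map, List.map_map]
  refine List.map_congr_left (fun k hk => ?_)
  rw [List.mem_range] at hk
  have h0 : (0 : Int) + (k : Int) = ((k : Nat) : Int) := by ring
  simp only [Function.comp, h0, PySem.List.slice_natCast]
  congr 1
  exact List.take_of_length_le (by simp)

lemma bLoop_eq (sep : String) (ts : List String) :
    (ts.reverse).foldl
      (fun (st : Option String × List String) (t : String) =>
        let acc := match st.1 with | none => t | some a => t ++ sep ++ a
        (some acc, st.2 ++ [acc]))
      (none, [])
    = ((sfxJoins sep ts).head?, (sfxJoins sep ts).reverse) := by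
  induction ts with
  | nil => simp [sfxJoins]
  | cons t rest ih =>
      rw [List.reverse_cons, List.foldl_append, ih]
      cases rest with
      | nil => simp [sfxJoins, str_join_singleton]
      | cons u us => simp [sfxJoins, str_join_cons_cons]

-- ===== VERDICT (by name: the statement is the Claim_ definition above) =====
theorem name_to_keywords_spec : Claim_equal_name_to_keywords := by
  intro nm sep _ hpre
  obtain ⟨hsome, hne, hsep⟩ := hpre
  unfold Spec_name_to_keywords name_to_keywords name_to_keywords_alt
  cases nm with
  | none => simp at hsome
  | some s =>
      simp only [Option.getD_some] at hne
      have hs : sep.toList ≠ [] := by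
        intro hnil; apply hsep; apply String.ext; simp [hnil]
      obtain ⟨ts, hts⟩ : ∃ ts, PySem.Str.split? (PySem.Str.strip s) sep = some ts := by
        simp [PySem.Str.split?, PySem.Chars.split?, hs]
      simp only [hne, hts]
      rw [aLoop_eq, bLoop_eq, List.reverse_reverse]
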